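-- pv_equiv track=rewrite | github.com/germainsafari/Flask_practice | coding alpha/for fun/for.py | alphabetic_order
-- ===== SOURCE A (Python) =====
-- def alphabetic_order(arr):
--     result = []
--     for word in arr:
--         for i in range(len(word)):
--             if ord(word[i]) < ord(word[0]):
--                 result.append("Yes")
--                 break
--         else:
--             result.append("No")
--     return result
-- ===== SOURCE B (Python) =====
-- def alphabetic_order(arr):
--     return ["No" if not w or sorted(w)[0] == w[0] else "Yes" for w in arr]
-- ===== Notes on version B (the rewrite author's own statement) =====
-- stated objective: alternative
-- what changed: Replaced A's per-word early-exit scan for a character below the first by sorting each word's characters and comparing the sorted head with the first character (equal iff nothing precedes it).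
import Mathlib
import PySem

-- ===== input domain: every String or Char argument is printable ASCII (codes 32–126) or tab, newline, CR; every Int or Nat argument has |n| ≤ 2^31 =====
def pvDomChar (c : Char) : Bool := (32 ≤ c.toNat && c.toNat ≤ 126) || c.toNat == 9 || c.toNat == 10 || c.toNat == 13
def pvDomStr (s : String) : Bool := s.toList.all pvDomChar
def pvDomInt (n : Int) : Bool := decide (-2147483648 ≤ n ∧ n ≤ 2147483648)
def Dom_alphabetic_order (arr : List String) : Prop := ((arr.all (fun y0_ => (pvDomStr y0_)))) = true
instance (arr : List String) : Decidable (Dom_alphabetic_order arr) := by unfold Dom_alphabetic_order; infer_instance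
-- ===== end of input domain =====

-- B replaces A's per-word early-exit scan by sorting each word and comparing the sorted head with the first character (objective: alternative).


-- ===== PORT A =====
-- inner 'for i in range(len(word)) … break / else': scan the characters, first c with ord c < ord c0 → "Yes", exhausted → "No"
def pvScanA (cs : List Char) (c0 : Char) : String :=
  match cs with
  | [] => "No"
  | c :: rest => if c.toNat < c0.toNat then "Yes" else pvScanA rest c0

def alphabetic_order (arr : List String) : List String :=
  arr.foldl (fun result word =>
    match word.toList with
    | [] => result ++ ["No"]            -- loop body never runs, else-branch appends "No"
    | c0 :: _ => result ++ [pvScanA word.toList c0]) []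

-- ===== PORT B =====
def alphabetic_order_alt (arr : List String) : List String :=
  arr.map (fun w =>
    if w.toList.isEmpty then "No"       -- 'not w'
    else if (PySem.List.sorted w.toList (fun x => x) false).head! = w.toList.head! then "No"
    else "Yes")

-- ===== PRECONDITION & SPEC =====
def Spec_alphabetic_order (arr : List String) (out : List String) : Prop := out = alphabetic_order_alt arr
instance (arr : List String) (out : List String) : Decidable (Spec_alphabetic_order arr out) := by unfold Spec_alphabetic_order; infer_instance

-- ===== CLAIM (what is proved, stated in full; the proofs are below) =====
def Claim_equal_alphabetic_order : Prop := ∀ (arr : List String), Dom_alphabetic_order arr → Spec_alphabetic_order arr (alphabetic_order arr)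

-- ===== LEMMAS AND PROOFS =====

theorem pvScanA_eq_any (cs : List Char) (c0 : Char) :
    pvScanA cs c0 = if cs.any (fun c => decide (c < c0)) then "Yes" else "No" := by
  induction cs with
  | nil => simp [pvScanA]
  | cons c rest ih =>
    simp only [pvScanA, List.any_cons]
    by_cases h : c < c0
    · have : c.toNat < c0.toNat := h
      simp [this, h]
    · have : ¬ c.toNat < c0.toNat := h
      simp [this, h, ih]

-- per word: A's scan equals B's sorted-head comparison
theorem perWord_eq (w : String) :
    (match w.toList with
     | [] => "No"
     | c0 :: _ => pvScanA w.toList c0) =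
    (if w.toList.isEmpty then "No"
     else if (PySem.List.sorted w.toList (fun x => x) false).head! = w.toList.head! then "No"
     else "Yes") := by
  cases h : w.toList with
  | nil => simp
  | cons c0 rest =>
    have hne : PySem.List.sorted (c0 :: rest) (fun x => x) false ≠ [] := by
      intro hnil
      exact (List.cons_ne_nil c0 rest) ((PySem.List.sorted_eq_nil_iff _ _ _).mp hnil)
    obtain ⟨m, t, hs⟩ := List.exists_cons_of_ne_nil hne
    have hle : ∀ y ∈ (c0 :: rest), m ≤ y :=
      PySem.List.key_head_sorted_le (xs := c0 :: rest) (key := fun x => x) hs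
    have hmem : m ∈ (c0 :: rest) := by
      have := (PySem.List.mem_sorted (x := m) (xs := c0 :: rest) (key := fun x => x) (rev := false)).mp
      exact this (by rw [hs]; exact List.mem_cons_self)
    show pvScanA (c0 :: rest) c0 = _
    rw [pvScanA_eq_any]
    simp only [List.isEmpty_cons, hs, List.head!]
    by_cases hm : m = c0
    · -- sorted head = c0 : no character is below c0
      have hany : (c0 :: rest).any (fun c => decide (c < c0)) = false := by
        simp only [List.any_eq_false, decide_eq_true_eq]
        intro c hc hlt
        exact absurd (hm ▸ hle c hc) (not_le.mpr hlt)
      simp [hany, hm]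
    · -- sorted head ≠ c0 : head is a character strictly below c0
      have hlt : m < c0 := lt_of_le_of_ne (hle c0 List.mem_cons_self) hm
      have hany : (c0 :: rest).any (fun c => decide (c < c0)) = true := by
        simp only [List.any_eq_true, decide_eq_true_eq]
        exact ⟨m, hmem, hlt⟩
      simp [hany, hm]

theorem foldl_append_map (arr : List String) (acc : List String) :
    (arr.foldl (fun result word =>
      match word.toList with
      | [] => result ++ ["No"]
      | c0 :: _ => result ++ [pvScanA word.toList c0]) acc) =
    acc ++ arr.map (fun w =>
      match w.toList with
      | [] => "No"
      | c0 :: _ => pvScanA w.toList c0) := by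
  induction arr generalizing acc with
  | nil => simp
  | cons w ws ih =>
    simp only [List.foldl_cons, List.map_cons]
    cases h : w.toList with
    | nil => rw [ih]; simp
    | cons c0 rest => rw [ih]; simp

-- ===== VERDICT (by name: the statement is the Claim_ definition above) =====
theorem alphabetic_order_spec : Claim_equal_alphabetic_order := by
  intro arr _
  unfold Spec_alphabetic_order alphabetic_order alphabetic_order_alt
  rw [foldl_append_map]
  simp only [List.nil_append]
  exact List.map_congr_left (fun w _ => perWord_eq w)
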